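-- pv_equiv track=rewrite | github.com/selfreferencing/erdos-86-lean | certificate_verification.py | find_witness_divisor_pair
-- ===== SOURCE A (Python) =====
-- from typing import List, Tuple, Set, Dict, Optional
--
-- def m_k(k: int) -> int:
--     """The modulus m_k = 4k + 3"""
--     return 4 * k + 3
--
-- def x_k(p: int, k: int) -> int:
--     """Compute x_k = (p + m_k) / 4"""
--     mk = m_k(k)
--     if (p + mk) % 4 != 0:
--         return -1
--     return (p + mk) // 4
--
-- def is_type_ii_witness(x: int, m: int, d: int) -> bool:
--     """Check if d is a Type II witness for (x, m)"""
--     if d <= 0 or x <= 0 or m <= 0: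
--         return False
--     if d > x:
--         return False
--     if (x * x) % d != 0:
--         return False
--     if (x + d) % m != 0:
--         return False
--     return True
--
-- def find_witness_divisor_pair(p: int, k: int) -> Optional[Tuple[int, int, int]]:
--     """
--     Find witness using divisor-pair lemma (GPT1).
--
--     Returns (d, a, b) where d is the witness and a, b are the divisor pair.
--     """
--     mk = m_k(k)
--     xk = x_k(p, k)
--     if xk <= 0:
--         return None
--
--     # Find divisors of x_k
--     divisors = []
--     i = 1
--     while i * i <= xk:
--         if xk % i == 0:
--             divisors.append(i)
--             if i != xk // i:
--                 divisors.append(xk // i)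
--         i += 1
--     divisors.sort()
--
--     # Look for divisor pair (a, b) with a + b ≡ 0 (mod m_k) and a ≤ b
--     for a in divisors:
--         for b in divisors:
--             if a <= b and (a + b) % mk == 0:
--                 # Witness is d = x_k * a / b
--                 if (xk * a) % b == 0:
--                     d = (xk * a) // b
--                     if is_type_ii_witness(xk, mk, d):
--                         return (d, a, b)
--
--     return None
-- ===== SOURCE B (Python) =====
-- def is_type_ii_witness(x: int, m: int, d: int) -> bool:
--     """Check if d is a Type II witness for (x, m)"""
--     if d <= 0 or x <= 0 or m <= 0:
--         return False
--     if d > x: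
--         return False
--     if (x * x) % d != 0:
--         return False
--     if (x + d) % m != 0:
--         return False
--     return True
--
-- def find_witness_divisor_pair(p, k):
--     mk = 4 * k + 3
--     if (p + mk) % 4 != 0:
--         return None
--     xk = (p + mk) // 4
--     if xk <= 0:
--         return None
--     divisors = []
--     i = 1
--     while i * i <= xk:
--         if xk % i == 0:
--             divisors += [i] if i * i == xk else [i, xk // i]
--         i += 1
--     divisors.sort()
--     # index the divisors by residue mod mk; each bucket is ascending
--     buckets = {}
--     for b in divisors:
--         buckets.setdefault(b % mk, []).append(b)
--     # scan a ascending; only the bucket with residue (-a) % mk can pair with a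
--     for a in divisors:
--         for b in buckets.get((-a) % mk, []):
--             if b >= a and (xk * a) % b == 0:
--                 d = (xk * a) // b
--                 if is_type_ii_witness(xk, mk, d):
--                     return (d, a, b)
--     return None
-- ===== Notes on version B (the rewrite author's own statement) =====
-- stated objective: alternative
-- what changed: B replaces A's quadratic scan over all divisor pairs with a dict index mapping each residue d % mk to its ascending divisors, so for each a only the single bucket with residue (-a) % mk is scanned (b >= a guard preserves the first-match order).
import Mathlib
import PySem

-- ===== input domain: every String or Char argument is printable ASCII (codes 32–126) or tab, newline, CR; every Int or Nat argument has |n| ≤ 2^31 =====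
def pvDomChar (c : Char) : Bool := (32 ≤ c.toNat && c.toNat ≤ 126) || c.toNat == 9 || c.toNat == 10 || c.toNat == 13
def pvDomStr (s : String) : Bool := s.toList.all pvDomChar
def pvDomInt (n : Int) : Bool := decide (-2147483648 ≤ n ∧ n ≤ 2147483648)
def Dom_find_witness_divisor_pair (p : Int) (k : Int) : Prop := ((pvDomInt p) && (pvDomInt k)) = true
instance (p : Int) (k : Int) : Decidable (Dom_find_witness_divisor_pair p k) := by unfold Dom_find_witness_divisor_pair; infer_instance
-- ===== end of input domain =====

-- B replaces A's quadratic scan over all divisor pairs by a residue-keyed bucket index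
-- (dict from d % mk to the ascending divisors with that residue), scanning only the one
-- bucket that can pair with each a; same first-match result.

-- ===== PORT A =====
-- helper m_k / x_k / is_type_ii_witness, as in the Python module (shared by both ports)
def m_k (k : Int) : Int := 4 * k + 3

def x_k (p : Int) (k : Int) : Int :=
  let mk := m_k k
  if PySem.Int.mod (p + mk) 4 != 0 then -1
  else PySem.Int.floordiv (p + mk) 4

def is_type_ii_witness (x : Int) (m : Int) (d : Int) : Bool :=
  if d ≤ 0 || x ≤ 0 || m ≤ 0 then false
  else if d > x then false
  else if PySem.Int.mod (x * x) d != 0 then false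
  else if PySem.Int.mod (x + d) m != 0 then false
  else true

-- A's `while i * i <= xk` divisor-collecting loop
def divLoopA (xk : Int) (i : Int) (acc : List Int) : List Int :=
  if _h : i * i ≤ xk then
    divLoopA xk (i + 1)
      (if PySem.Int.mod xk i == 0 then
        (if i != PySem.Int.floordiv xk i then
          (acc ++ [i]) ++ [PySem.Int.floordiv xk i]
        else acc ++ [i])
      else acc)
  else acc
termination_by ((xk + 1) - i).toNat
decreasing_by
  have hi : i ≤ xk := by
    by_cases h0 : i ≤ 0
    · nlinarith [mul_self_nonneg i]
    · nlinarith
  omega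

def find_witness_divisor_pair (p : Int) (k : Int) : Option (Int × Int × Int) :=
  let mk := m_k k
  let xk := x_k p k
  if xk ≤ 0 then none
  else
    let divisors := PySem.List.sorted (divLoopA xk 1 []) (fun x => x) false
    divisors.findSome? (fun a =>
      divisors.findSome? (fun b =>
        if decide (a ≤ b) && (PySem.Int.mod (a + b) mk == 0) then
          if PySem.Int.mod (xk * a) b == 0 then
            let d := PySem.Int.floordiv (xk * a) b
            if is_type_ii_witness xk mk d then some (d, a, b) else none
          else none
        else none))

-- ===== PORT B =====
-- B's divisor loop (extends by [i] or [i, xk // i] in one step)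
def divLoopB (xk : Int) (i : Int) (acc : List Int) : List Int :=
  if _h : i * i ≤ xk then
    divLoopB xk (i + 1)
      (if PySem.Int.mod xk i == 0 then
        acc ++ (if i * i == xk then [i] else [i, PySem.Int.floordiv xk i])
      else acc)
  else acc
termination_by ((xk + 1) - i).toNat
decreasing_by
  have hi : i ≤ xk := by
    by_cases h0 : i ≤ 0
    · nlinarith [mul_self_nonneg i]
    · nlinarith
  omega

def find_witness_divisor_pair_alt (p : Int) (k : Int) : Option (Int × Int × Int) :=
  let mk := 4 * k + 3
  if PySem.Int.mod (p + mk) 4 != 0 then none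
  else
    let xk := PySem.Int.floordiv (p + mk) 4
    if xk ≤ 0 then none
    else
      let divisors := PySem.List.sorted (divLoopB xk 1 []) (fun x => x) false
      -- buckets.setdefault(b % mk, []).append(b) : list for key b % mk gets b appended
      let buckets := divisors.foldl
        (fun d b => d.modify (PySem.Int.mod b mk) [] (fun l => l ++ [b]))
        (PySem.Dict.empty : PySem.Dict Int (List Int))
      divisors.findSome? (fun a =>
        (buckets.getD (PySem.Int.mod (-a) mk) []).findSome? (fun b =>
          if decide (b ≥ a) && (PySem.Int.mod (xk * a) b == 0) then
            let d := PySem.Int.floordiv (xk * a) b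
            if is_type_ii_witness xk mk d then some (d, a, b) else none
          else none))

-- ===== PRECONDITION & SPEC =====
def Spec_find_witness_divisor_pair (p : Int) (k : Int) (out : Option (Int × Int × Int)) : Prop := out = find_witness_divisor_pair_alt p k
instance (p : Int) (k : Int) (out : Option (Int × Int × Int)) : Decidable (Spec_find_witness_divisor_pair p k out) := by unfold Spec_find_witness_divisor_pair; infer_instance

-- ===== CLAIM (what is proved, stated in full; the proofs are below) =====
def Claim_equal_find_witness_divisor_pair : Prop := ∀ (p : Int) (k : Int), Dom_find_witness_divisor_pair p k → Spec_find_witness_divisor_pair p k (find_witness_divisor_pair p k)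

-- ===== LEMMAS AND PROOFS =====

-- the two divisor loops build the same list
theorem divLoop_eq (xk : Int) (i : Int) (acc : List Int) (hi : 1 ≤ i) :
    divLoopA xk i acc = divLoopB xk i acc := by
  induction i, acc using divLoopA.induct xk with
  | case1 i acc h ih =>
    rw [divLoopA, divLoopB]
    simp only [dif_pos h]
    have hstep :
        (if PySem.Int.mod xk i == 0 then
          (if i != PySem.Int.floordiv xk i then
            (acc ++ [i]) ++ [PySem.Int.floordiv xk i]
          else acc ++ [i])
        else acc)
        = (if PySem.Int.mod xk i == 0 then
            acc ++ (if i * i == xk then [i] else [i, PySem.Int.floordiv xk i])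
          else acc) := by
      by_cases hmod : PySem.Int.mod xk i = 0
      · have hfm := PySem.Int.floordiv_mul_add_mod xk i
        rw [hmod, add_zero] at hfm
        by_cases hsq : i * i = xk
        · have hfd : PySem.Int.floordiv xk i = i := by
            have : PySem.Int.floordiv xk i * i = i * i := by rw [hfm, hsq]
            exact mul_right_cancel₀ (by omega) this
          simp [hmod, hsq, hfd]
        · have hfd : i ≠ PySem.Int.floordiv xk i := by
            intro hEq
            rw [← hEq] at hfm
            exact hsq hfm
          simp [hmod, hsq, hfd]
      · simp [hmod]
    simp only [dite_eq_ite] at ih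
    rw [hstep] at ih ⊢
    exact ih (by omega)
  | case2 i acc h =>
    rw [divLoopA, divLoopB]
    simp [h]

-- the bucket for key r holds exactly the divisors with residue r, in order
theorem bucket_getD (mk : Int) (l : List Int) (d : PySem.Dict Int (List Int)) (r : Int) :
    (l.foldl (fun d b => d.modify (PySem.Int.mod b mk) [] (fun xs => xs ++ [b])) d).getD r []
      = d.getD r [] ++ l.filter (fun b => PySem.Int.mod b mk == r) := by
  induction l generalizing d with
  | nil => simp
  | cons x t ih =>
    simp only [List.foldl_cons, List.filter_cons]
    rw [ih, PySem.Dict.getD_modify]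
    by_cases hx : PySem.Int.mod x mk = r
    · simp [hx]
    · simp [hx, Ne.symm hx]

theorem findSome?_filter {α β : Type} (p : α → Bool) (f : α → Option β) (l : List α) :
    (l.filter p).findSome? f = l.findSome? (fun x => if p x then f x else none) := by
  induction l with
  | nil => simp
  | cons x t ih =>
    by_cases hp : p x
    · simp [hp, List.findSome?_cons, ih]
    · simp [hp, ih]

theorem findSome?_ext {α β : Type} (f g : α → Option β) (l : List α)
    (h : ∀ x ∈ l, f x = g x) : l.findSome? f = l.findSome? g := by
  induction l with
  | nil => rfl
  | cons x t ih =>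
    simp only [List.findSome?_cons, h x (by simp)]
    cases g x with
    | none => exact ih (fun y hy => h y (by simp [hy]))
    | some v => rfl

-- b ≡ -a (mod mk) iff a + b ≡ 0 (mod mk), Python semantics, any mk ≠ 0
theorem mod_neg_eq_iff (mk a b : Int) (h : mk ≠ 0) :
    PySem.Int.mod b mk = PySem.Int.mod (-a) mk ↔ PySem.Int.mod (a + b) mk = 0 := by
  rw [PySem.Int.mod_eq_zero_iff_dvd]
  have hb := PySem.Int.floordiv_mul_add_mod b mk
  have ha := PySem.Int.floordiv_mul_add_mod (-a) mk
  constructor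
  · intro h'
    rw [h'] at hb
    exact ⟨PySem.Int.floordiv b mk - PySem.Int.floordiv (-a) mk, by linear_combination ha - hb⟩
  · rintro ⟨c, hc⟩
    have huv : PySem.Int.mod b mk - PySem.Int.mod (-a) mk
        = mk * (c - PySem.Int.floordiv b mk + PySem.Int.floordiv (-a) mk) := by
      linear_combination hb - ha + hc
    set e := c - PySem.Int.floordiv b mk + PySem.Int.floordiv (-a) mk with he
    have he0 : e = 0 := by
      by_contra hne
      rcases lt_or_gt_of_ne h with hneg | hpos
      · have h1 := PySem.Int.mod_neg_bounds b hneg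
        have h2 := PySem.Int.mod_neg_bounds (-a) hneg
        rcases lt_or_gt_of_ne hne with h3 | h3
        · have : mk * e ≥ -mk := by nlinarith
          omega
        · have : mk * e ≤ mk := by nlinarith
          omega
      · have h1a := PySem.Int.mod_nonneg b hpos
        have h1b := PySem.Int.mod_lt b hpos
        have h2a := PySem.Int.mod_nonneg (-a) hpos
        have h2b := PySem.Int.mod_lt (-a) hpos
        rcases lt_or_gt_of_ne hne with h3 | h3
        · have : mk * e ≤ -mk := by nlinarith
          omega
        · have : mk * e ≥ mk := by nlinarith
          omega
    rw [he0, mul_zero] at huv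
    omega

-- ===== VERDICT (by name: the statement is the Claim_ definition above) =====
theorem find_witness_divisor_pair_spec : Claim_equal_find_witness_divisor_pair := by
  intro p k _
  unfold Spec_find_witness_divisor_pair find_witness_divisor_pair find_witness_divisor_pair_alt x_k m_k
  dsimp only
  have hmk : (4 * k + 3 : Int) ≠ 0 := by omega
  by_cases h4 : PySem.Int.mod (p + (4 * k + 3)) 4 = 0
  · have hbne : (PySem.Int.mod (p + (4 * k + 3)) 4 != 0) = false := by
      rw [h4]; rfl
    rw [hbne]
    simp only [Bool.false_eq_true, if_false]
    by_cases hx : PySem.Int.floordiv (p + (4 * k + 3)) 4 ≤ 0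
    · rw [if_pos hx, if_pos hx]
    · rw [if_neg hx, if_neg hx]
      set mk : Int := 4 * k + 3 with hmkdef
      set xk : Int := PySem.Int.floordiv (p + (4 * k + 3)) 4 with hxkdef
      rw [← divLoop_eq xk 1 [] (by omega)]
      apply findSome?_ext
      intro a _
      rw [bucket_getD, PySem.Dict.getD_empty, List.nil_append, findSome?_filter]
      apply Eq.symm
      apply findSome?_ext
      intro b _
      have hc := mod_neg_eq_iff mk a b hmk
      by_cases hcb : PySem.Int.mod b mk = PySem.Int.mod (-a) mk
      · have h2 : PySem.Int.mod (a + b) mk = 0 := hc.mp hcb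
        by_cases h1 : a ≤ b <;> by_cases h3 : PySem.Int.mod (xk * a) b = 0 <;>
          simp [hcb, h2, h1, h3, ge_iff_le]
      · have h2 : ¬ PySem.Int.mod (a + b) mk = 0 := fun hh => hcb (hc.mpr hh)
        simp [hcb, h2]
  · have hbne : (PySem.Int.mod (p + (4 * k + 3)) 4 != 0) = true := by
      simpa using h4
    rw [hbne]
    simp only [if_true]
    rw [if_pos (by norm_num : (-1 : Int) ≤ 0)]
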